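-- pv_equiv track=rewrite | github.com/pypi-data/pypi-mirror-340 | packages/codeEditorSDK/codeeditorsdk-0.1.1-py3-none-any.whl/codeEditorSDK/core/codeEditor.py | _detect_indent
-- ===== SOURCE A (Python) =====
-- def _detect_indent(line: str) -> str:
--     """检测行的缩进字符（空格或制表符）"""
--     indent = ''
--     for char in line:
--         if char in (' ', '\t'):
--             indent += char
--         else:
--             break
--     return indent
-- ===== SOURCE B (Python) =====
-- def _detect_indent(line: str) -> str:
--     stripped = line.lstrip(' \t')
--     return line[:len(line) - len(stripped)]
-- ===== Notes on version B (the rewrite author's own statement) =====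
-- stated objective: idiomatic
-- what changed: Replaces the char-by-char accumulating loop with a measure-and-slice: lstrip of space and tab, then take the prefix whose length is the length difference.
import Mathlib
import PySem

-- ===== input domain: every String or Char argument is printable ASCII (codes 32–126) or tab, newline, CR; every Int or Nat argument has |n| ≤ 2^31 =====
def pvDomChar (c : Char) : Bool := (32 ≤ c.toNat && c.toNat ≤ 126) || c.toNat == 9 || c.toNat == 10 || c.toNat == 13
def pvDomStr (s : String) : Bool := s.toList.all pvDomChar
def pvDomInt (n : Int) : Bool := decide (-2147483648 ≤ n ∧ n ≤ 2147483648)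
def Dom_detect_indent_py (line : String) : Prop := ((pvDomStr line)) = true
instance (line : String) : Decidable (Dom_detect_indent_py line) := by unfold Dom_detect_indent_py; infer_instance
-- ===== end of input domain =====

-- B replaces A's accumulating loop with lstrip(' \t') and a length-difference slice (idiomatic; same cost).

-- char in (' ', '\t')
def isIndentChar (c : Char) : Bool := c == ' ' || c == '\t'

-- ===== PORT A =====
-- the for-loop with break: accumulate indent chars until the first non-indent char
def detectIndentLoop (acc : List Char) : List Char → List Char
  | [] => acc
  | c :: rest => if isIndentChar c then detectIndentLoop (acc ++ [c]) rest else acc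

def detect_indent_py (line : String) : String :=
  String.ofList (detectIndentLoop [] line.toList)

-- ===== PORT B =====
-- line.lstrip(' \t') is exactly dropWhile isIndentChar on the char list; line[:k] is slice none k
def detect_indent_py_alt (line : String) : String :=
  let stripped := line.toList.dropWhile isIndentChar
  String.ofList (PySem.List.slice line.toList none
    (some ((line.toList.length : Int) - (stripped.length : Int))))

-- ===== PRECONDITION & SPEC =====
def Spec_detect_indent_py (line : String) (out : String) : Prop := out = detect_indent_py_alt line
instance (line : String) (out : String) : Decidable (Spec_detect_indent_py line out) := by unfold Spec_detect_indent_py; infer_instance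

-- ===== CLAIM (what is proved, stated in full; the proofs are below) =====
def Claim_equal_detect_indent_py : Prop := ∀ (line : String), Dom_detect_indent_py line → Spec_detect_indent_py line (detect_indent_py line)

-- ===== LEMMAS AND PROOFS =====
theorem detectIndentLoop_eq (acc : List Char) (cs : List Char) :
    detectIndentLoop acc cs = acc ++ cs.takeWhile isIndentChar := by
  induction cs generalizing acc with
  | nil => simp [detectIndentLoop]
  | cons c rest ih =>
    by_cases h : isIndentChar c <;>
      simp [detectIndentLoop, h, ih]

theorem alt_eq (line : String) :
    detect_indent_py_alt line = String.ofList (line.toList.takeWhile isIndentChar) := by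
  unfold detect_indent_py_alt
  have hsplit := congrArg List.length
    (List.takeWhile_append_dropWhile (p := isIndentChar) (l := line.toList))
  simp only [List.length_append] at hsplit
  have hcast : ((line.toList.length : Int) -
      ((line.toList.dropWhile isIndentChar).length : Int))
      = ((line.toList.takeWhile isIndentChar).length : Int) := by omega
  simp only [hcast, PySem.List.slice_to_natCast]
  obtain ⟨t, ht⟩ := List.takeWhile_prefix (p := isIndentChar) (l := line.toList)
  generalize hTW : List.takeWhile isIndentChar line.toList = tw at ht ⊢
  rw [← ht, List.take_left]

-- ===== VERDICT (by name: the statement is the Claim_ definition above) =====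
theorem detect_indent_py_spec : Claim_equal_detect_indent_py := by
  intro line _
  unfold Spec_detect_indent_py
  rw [alt_eq, detect_indent_py, detectIndentLoop_eq]
  simp
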